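-- pv_equiv track=rewrite | github.com/MrBrantCode/unitest_baseline | mut_generate/mist_train_cf/cf_44615/solution.py | find_divisors_and_prime_status
-- ===== SOURCE A (Python) =====
-- def find_divisors_and_prime_status(n):
--     def is_prime(number):
--         if number <= 1:
--             return False
--         if number <= 3:
--             return True
--         if number % 2 == 0 or number % 3 == 0:
--             return False
--         i = 5
--         while i * i <= number:
--             if number % i == 0 or number % (i + 2) == 0:
--                 return False
--             i += 6
--         return True
--
--     divisors = [(i, is_prime(i)) for i in range(1, n + 1) if n % i == 0]
--     return divisors
-- ===== SOURCE B (Python) =====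
-- def find_divisors_and_prime_status(n):
--     def is_prime(d):
--         if d < 2:
--             return False
--         j = 2
--         while j * j <= d:
--             if d % j == 0:
--                 return False
--             j += 1
--         return True
--
--     small = []
--     large = []
--     i = 1
--     while i * i <= n:
--         if n % i == 0:
--             small.append(i)
--             if i != n // i:
--                 large.append(n // i)
--         i += 1
--     return [(d, is_prime(d)) for d in small + large[::-1]]
-- ===== Notes on version B (the rewrite author's own statement) =====
-- stated objective: faster
-- what changed: B enumerates divisors only up to sqrt(n), pairing each small divisor i with its cofactor n//i and concatenating the small list with the reversed cofactor list (no sort needed), instead of A's trial of every i in 1..n; B also replaces A's wheel-of-six primality test by plain trial division up to sqrt.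
import Mathlib
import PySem

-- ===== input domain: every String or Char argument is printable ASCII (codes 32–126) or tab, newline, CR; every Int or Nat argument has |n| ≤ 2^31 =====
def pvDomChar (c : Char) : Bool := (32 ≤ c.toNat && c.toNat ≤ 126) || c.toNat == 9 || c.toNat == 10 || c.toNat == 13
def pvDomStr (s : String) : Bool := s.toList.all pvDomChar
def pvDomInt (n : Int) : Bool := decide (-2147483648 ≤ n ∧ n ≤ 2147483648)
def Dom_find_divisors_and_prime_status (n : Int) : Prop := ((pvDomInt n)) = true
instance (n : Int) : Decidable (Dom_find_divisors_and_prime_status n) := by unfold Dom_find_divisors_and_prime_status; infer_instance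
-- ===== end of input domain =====

-- B enumerates divisors only up to sqrt(n), pairing each small divisor i with its
-- cofactor n//i and building the ascending result directly (small list ++ reversed
-- cofactor list) instead of A's trial division over every i in 1..n, and tests
-- primality by plain trial division up to sqrt instead of A's wheel of six.

-- termination helper for the while-loop ports (cited by decreasing_by; kept small on purpose)
lemma pvDecrHelp (n i k : Int) (hk : 1 ≤ k) (h : i * i ≤ n) :
    (n + 1 - (i + k)).toNat < (n + 1 - i).toNat := by
  have h1 : i ≤ i * i := by
    rcases lt_or_ge i 1 with h' | h'
    · exact le_trans (by omega) (mul_self_nonneg i)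
    · exact le_mul_of_one_le_left (by omega) h'
  omega

-- ===== PORT A =====
-- inner while loop of A's is_prime (wheel of six)
def isPrimeLoop (number i : Int) : Bool :=
  if _h : i * i ≤ number then
    if PySem.Int.mod number i == 0 || PySem.Int.mod number (i + 2) == 0 then false
    else isPrimeLoop number (i + 6)
  else true
termination_by (number + 1 - i).toNat
decreasing_by
  exact pvDecrHelp number i 6 (by omega) _h

def isPrime (number : Int) : Bool :=
  if number ≤ 1 then false
  else if number ≤ 3 then true
  else if PySem.Int.mod number 2 == 0 || PySem.Int.mod number 3 == 0 then false
  else isPrimeLoop number 5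

def find_divisors_and_prime_status (n : Int) : List (Int × Bool) :=
  ((PySem.List.pyRange 1 (n + 1) 1).filter (fun i => PySem.Int.mod n i == 0)).map
    (fun i => (i, isPrime i))

-- ===== PORT B =====
-- inner while loop of Source B's is_prime (plain trial division)
def isPrimeLoopB (d j : Int) : Bool :=
  if _h : j * j ≤ d then
    if PySem.Int.mod d j == 0 then false
    else isPrimeLoopB d (j + 1)
  else true
termination_by (d + 1 - j).toNat
decreasing_by
  exact pvDecrHelp d j 1 (by omega) _h

def isPrimeB (d : Int) : Bool :=
  if d < 2 then false else isPrimeLoopB d 2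

-- the while loop of Source B: collect small divisors (ascending) and their cofactors
def divLoop (n i : Int) (small large : List Int) : List Int × List Int :=
  if _h : i * i ≤ n then
    if PySem.Int.mod n i == 0 then
      divLoop n (i + 1) (small ++ [i])
        (if i ≠ PySem.Int.floordiv n i then large ++ [PySem.Int.floordiv n i] else large)
    else divLoop n (i + 1) small large
  else (small, large)
termination_by (n + 1 - i).toNat
decreasing_by
  all_goals exact pvDecrHelp n i 1 (by omega) _h

def find_divisors_and_prime_status_alt (n : Int) : List (Int × Bool) :=
  let p := divLoop n 1 [] []
  (p.1 ++ p.2.reverse).map (fun d => (d, isPrimeB d))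

-- ===== PRECONDITION & SPEC =====
def Spec_find_divisors_and_prime_status (n : Int) (out : List (Int × Bool)) : Prop := out = find_divisors_and_prime_status_alt n
instance (n : Int) (out : List (Int × Bool)) : Decidable (Spec_find_divisors_and_prime_status n out) := by unfold Spec_find_divisors_and_prime_status; infer_instance

-- ===== CLAIM (what is proved, stated in full; the proofs are below) =====
def Claim_equal_find_divisors_and_prime_status : Prop := ∀ (n : Int), Dom_find_divisors_and_prime_status n → Spec_find_divisors_and_prime_status n (find_divisors_and_prime_status n)

-- ===== LEMMAS AND PROOFS =====

-- ---- primality: both tests decide "2 ≤ m and no divisor k with 2 ≤ k, k*k ≤ m" ----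
def specNoDiv (m : Int) : Prop := ∀ k : Int, 2 ≤ k → k * k ≤ m → ¬ (k ∣ m)

lemma loopB_iff (d j : Int) (hj : 2 ≤ j)
    (hsmall : ∀ k, 2 ≤ k → k < j → k * k ≤ d → ¬ (k ∣ d)) :
    isPrimeLoopB d j = true ↔ specNoDiv d := by
  fun_induction isPrimeLoopB d j with
  | case1 j h hmod =>
      simp only [Bool.false_eq_true, false_iff]
      intro hs
      exact hs j hj h ((PySem.Int.mod_eq_zero_iff_dvd d j).mp (by simpa using hmod))
  | case2 j h hmod ih =>
      refine ih (by omega) ?_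
      intro k hk2 hkj hkk
      rcases lt_or_ge k j with h' | h'
      · exact hsmall k hk2 h' hkk
      · have hkj' : k = j := by omega
        subst hkj'
        intro hdvd
        exact absurd ((PySem.Int.mod_eq_zero_iff_dvd d k).mpr hdvd) (by simpa using hmod)
  | case3 j h =>
      simp only [true_iff]
      intro k hk2 hkk
      have hkj : k < j := by nlinarith
      exact hsmall k hk2 hkj hkk

lemma isPrimeB_iff (d : Int) : isPrimeB d = true ↔ (2 ≤ d ∧ specNoDiv d) := by
  unfold isPrimeB
  split_ifs with h
  · simp only [false_iff]
    rintro ⟨h2, -⟩; omega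
  · rw [loopB_iff d 2 (by omega) (fun k hk2 hk _ => by omega)]
    constructor
    · intro hs; exact ⟨by omega, hs⟩
    · rintro ⟨-, hs⟩; exact hs

lemma loopA_iff (m i : Int) (hi : 5 ≤ i) (h6 : i % 6 = 5)
    (hsmall : ∀ k, 2 ≤ k → k < i → ¬ (k ∣ m)) :
    isPrimeLoop m i = true ↔ specNoDiv m := by
  fun_induction isPrimeLoop m i with
  | case1 i h hmod =>
      simp only [Bool.false_eq_true, false_iff]
      intro hs
      simp only [Bool.or_eq_true, beq_iff_eq] at hmod
      rcases hmod with hmi | hmi2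
      · exact hs i (by omega) h ((PySem.Int.mod_eq_zero_iff_dvd m i).mp hmi)
      · have hdvd : (i + 2) ∣ m := (PySem.Int.mod_eq_zero_iff_dvd m (i + 2)).mp hmi2
        rcases le_or_gt ((i + 2) * (i + 2)) m with hc | hc
        · exact hs (i + 2) (by omega) hc hdvd
        · -- m < (i+2)²: the cofactor q = m/(i+2) satisfies 2 ≤ q, q*q ≤ m, q ∣ m
          obtain ⟨q, hq⟩ := hdvd
          have hm25 : i * i ≤ m := h
          have hq2 : i - 1 ≤ q := by nlinarith
          have hqlt : q < i + 2 := by nlinarith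
          have hqq : q * q ≤ m := by nlinarith
          exact hs q (by omega) hqq ⟨i + 2, by linarith [hq, mul_comm (i + 2) q]⟩
  | case2 i h hmod ih =>
      simp only [Bool.or_eq_true, beq_iff_eq, not_or] at hmod
      refine ih (by omega) (by omega) ?_
      intro k hk2 hki6 hdvd
      rcases lt_or_ge k i with h' | h'
      · exact hsmall k hk2 h' hdvd
      · have h2m : ¬ (2 ∣ m) := hsmall 2 (by omega) (by omega)
        have h3m : ¬ (3 ∣ m) := hsmall 3 (by omega) (by omega)
        have hcases : k = i ∨ k = i + 1 ∨ k = i + 2 ∨ k = i + 3 ∨ k = i + 4 ∨ k = i + 5 := by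
          omega
        rcases hcases with rfl | rfl | rfl | rfl | rfl | rfl
        · exact absurd ((PySem.Int.mod_eq_zero_iff_dvd m _).mpr hdvd) hmod.1
        · exact h2m (dvd_trans (show (2:Int) ∣ i + 1 by omega) hdvd)
        · exact absurd ((PySem.Int.mod_eq_zero_iff_dvd m _).mpr hdvd) hmod.2
        · exact h2m (dvd_trans (show (2:Int) ∣ i + 3 by omega) hdvd)
        · exact h3m (dvd_trans (show (3:Int) ∣ i + 4 by omega) hdvd)
        · exact h2m (dvd_trans (show (2:Int) ∣ i + 5 by omega) hdvd)
  | case3 i h =>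
      simp only [true_iff]
      intro k hk2 hkk hdvd
      have hki : k < i := by nlinarith
      exact hsmall k hk2 hki hdvd

lemma isPrimeA_iff (m : Int) : isPrime m = true ↔ (2 ≤ m ∧ specNoDiv m) := by
  unfold isPrime
  split_ifs with h1 h3 hmod
  · simp only [false_iff]
    rintro ⟨h2, -⟩; omega
  · simp only [true_iff]
    refine ⟨by omega, ?_⟩
    intro k hk2 hkk
    nlinarith
  · simp only [false_iff]
    simp only [Bool.or_eq_true, beq_iff_eq] at hmod
    rintro ⟨-, hs⟩
    rcases hmod with hm2 | hm3
    · exact hs 2 (by omega) (by omega) ((PySem.Int.mod_eq_zero_iff_dvd m 2).mp hm2)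
    · have hd3 : (3:Int) ∣ m := (PySem.Int.mod_eq_zero_iff_dvd m 3).mp hm3
      rcases le_or_gt 9 m with h9 | h9
      · exact hs 3 (by omega) (by omega) hd3
      · -- 4 ≤ m < 9 and 3 ∣ m forces m = 6, which 2 ∣ m also catches — but that
        -- branch is the first disjunct; here 3 ∣ m with ¬2∣m... m = 6 has 2∣m,
        -- still reachable only via hm3, so handle m = 6 with k = 2
        have hm6 : m = 6 := by omega
        exact hs 2 (by omega) (by omega) (by omega)
  · simp only [Bool.or_eq_true, beq_iff_eq, not_or] at hmod
    rw [loopA_iff m 5 (by omega) (by omega) ?_]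
    · constructor
      · intro hs; exact ⟨by omega, hs⟩
      · rintro ⟨-, hs⟩; exact hs
    · intro k hk2 hk5 hdvd
      interval_cases k
      · exact absurd ((PySem.Int.mod_eq_zero_iff_dvd m 2).mpr hdvd) hmod.1
      · exact absurd ((PySem.Int.mod_eq_zero_iff_dvd m 3).mpr hdvd) hmod.2
      · exact absurd ((PySem.Int.mod_eq_zero_iff_dvd m 2).mpr (dvd_trans (by omega) hdvd)) hmod.1

lemma prime_eq (d : Int) : isPrime d = isPrimeB d := by
  have hA := isPrimeA_iff d
  have hB := isPrimeB_iff d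
  cases h1 : isPrime d <;> cases h2 : isPrimeB d <;> simp_all

-- ---- divisor enumeration: accumulator-free forms of the two lists built by divLoop ----
def smallL (n i : Int) : List Int :=
  if _h : i * i ≤ n then
    (if PySem.Int.mod n i == 0 then [i] else []) ++ smallL n (i + 1)
  else []
termination_by (n + 1 - i).toNat
decreasing_by
  exact pvDecrHelp n i 1 (by omega) _h

def largeL (n i : Int) : List Int :=
  if _h : i * i ≤ n then
    (if PySem.Int.mod n i == 0 ∧ i ≠ PySem.Int.floordiv n i then [PySem.Int.floordiv n i] else [])
      ++ largeL n (i + 1)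
  else []
termination_by (n + 1 - i).toNat
decreasing_by
  exact pvDecrHelp n i 1 (by omega) _h

lemma smallL_unfold (n i : Int) (h : i * i ≤ n) :
    smallL n i = (if PySem.Int.mod n i == 0 then [i] else []) ++ smallL n (i + 1) := by
  rw [smallL]; simp [h]

lemma largeL_unfold (n i : Int) (h : i * i ≤ n) :
    largeL n i =
      (if PySem.Int.mod n i == 0 ∧ i ≠ PySem.Int.floordiv n i then [PySem.Int.floordiv n i] else [])
        ++ largeL n (i + 1) := by
  rw [largeL]; simp [h]

set_option maxRecDepth 8000 in
lemma divLoop_eq (n i : Int) (s l : List Int) :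
    divLoop n i s l = (s ++ smallL n i, l ++ largeL n i) := by
  fun_induction divLoop n i s l with
  | case1 i s l h hmod ih =>
      simp only [dite_eq_ite] at ih
      rw [ih, smallL_unfold n i h, largeL_unfold n i h]
      by_cases hq : i = PySem.Int.floordiv n i
      · have h1 : ¬ (i ≠ PySem.Int.floordiv n i) := fun hne => hne hq
        simp [hmod, h1]
      · simp [hmod, hq]
  | case2 i s l h hmod ih =>
      rw [ih, smallL_unfold n i h, largeL_unfold n i h]
      simp at hmod
      simp [hmod]
  | case3 i s l h =>
      rw [smallL, largeL]
      simp [h]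

lemma mem_smallL (n i d : Int) :
    1 ≤ i → (d ∈ smallL n i ↔ i ≤ d ∧ d * d ≤ n ∧ PySem.Int.mod n d = 0) := by
  fun_induction smallL n i with
  | case1 i h ih =>
      intro hi
      rw [List.mem_append, ih (by omega)]
      constructor
      · rintro (hd | ⟨h1, h2, h3⟩)
        · split_ifs at hd with hm
          · simp at hd; subst hd; exact ⟨le_refl _, h, by simpa using hm⟩
          · simp at hd
        · exact ⟨by omega, h2, h3⟩
      · rintro ⟨h1, h2, h3⟩
        by_cases hd : d = i
        · subst hd; left; simp [h3]
        · right; exact ⟨by omega, h2, h3⟩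
  | case2 i h =>
      intro hi
      simp only [List.not_mem_nil, false_iff]
      rintro ⟨h1, h2, -⟩
      have : i * i ≤ d * d := by nlinarith
      omega

lemma mem_largeL (n i x : Int) :
    1 ≤ i → (x ∈ largeL n i ↔
      ∃ d, i ≤ d ∧ d * d ≤ n ∧ PySem.Int.mod n d = 0 ∧ d ≠ PySem.Int.floordiv n d ∧
        x = PySem.Int.floordiv n d) := by
  fun_induction largeL n i with
  | case1 i h ih =>
      intro hi
      rw [List.mem_append, ih (by omega)]
      constructor
      · rintro (hx | ⟨d, h1, h2, h3, h4, h5⟩)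
        · split_ifs at hx with hm
          · simp at hx; exact ⟨i, le_refl _, h, by simpa using hm.1, hm.2, hx⟩
          · simp at hx
        · exact ⟨d, by omega, h2, h3, h4, h5⟩
      · rintro ⟨d, h1, h2, h3, h4, h5⟩
        by_cases hd : d = i
        · subst hd; left; simp [h3, h4, h5]
        · right; exact ⟨d, by omega, h2, h3, h4, h5⟩
  | case2 i h =>
      intro hi
      simp only [List.not_mem_nil, false_iff]
      rintro ⟨d, h1, h2, -⟩
      have : i * i ≤ d * d := by nlinarith
      omega

lemma dvd_of_mod {n d : Int} (h : PySem.Int.mod n d = 0) : d ∣ n :=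
  (PySem.Int.mod_eq_zero_iff_dvd n d).mp h

lemma fd_mul {n d : Int} (hd : 0 < d) (h : d ∣ n) : d * PySem.Int.floordiv n d = n := by
  rw [PySem.Int.floordiv_eq_ediv_of_pos hd, mul_comm]
  exact Int.ediv_mul_cancel h

lemma quot_lt (n i d : Int) (hi : 1 ≤ i) (hid : i < d) (hdd : d * d ≤ n)
    (hmi : PySem.Int.mod n i = 0) (hmd : PySem.Int.mod n d = 0) :
    PySem.Int.floordiv n d < PySem.Int.floordiv n i := by
  have hiq := fd_mul (show (0:Int) < i by omega) (dvd_of_mod hmi)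
  have hdq := fd_mul (show (0:Int) < d by omega) (dvd_of_mod hmd)
  set a := PySem.Int.floordiv n i with ha
  set b := PySem.Int.floordiv n d with hb
  have hn1 : 1 ≤ n := by nlinarith
  have hb1 : 1 ≤ b := by nlinarith
  nlinarith [hiq, hdq, hi, hid, hb1]

lemma small_char (n d : Int) :
    d ∈ smallL n 1 ↔ 1 ≤ d ∧ d * d ≤ n ∧ PySem.Int.mod n d = 0 :=
  mem_smallL n 1 d (by omega)

lemma large_char (n x : Int) :
    x ∈ largeL n 1 ↔ 1 ≤ x ∧ x ≤ n ∧ PySem.Int.mod n x = 0 ∧ n < x * x := by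
  rw [mem_largeL n 1 x (by omega)]
  constructor
  · rintro ⟨d, hd1, hd2, hmd, hne, rfl⟩
    have hq := fd_mul (show (0:Int) < d by omega) (dvd_of_mod hmd)
    set q := PySem.Int.floordiv n d with hqdef
    have hn1 : 1 ≤ n := by nlinarith
    have hq1 : 1 ≤ q := by nlinarith
    have hdq : d < q := by
      have hle : d ≤ q := by nlinarith
      omega
    refine ⟨hq1, by nlinarith, ?_, by nlinarith⟩
    exact (PySem.Int.mod_eq_zero_iff_dvd n q).mpr ⟨d, by linarith [hq, mul_comm d q]⟩
  · rintro ⟨hx1, hxn, hmx, hnx⟩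
    have hxd := fd_mul (show (0:Int) < x by omega) (dvd_of_mod hmx)
    set d := PySem.Int.floordiv n x with hddef
    have hn1 : 1 ≤ n := by omega
    have hd1 : 1 ≤ d := by nlinarith
    have hdx : d < x := by nlinarith
    have hdx2 : d * x = n := by linarith [mul_comm x d]
    have hfd : PySem.Int.floordiv n d = x := by
      have h2 := fd_mul (show (0:Int) < d by omega) (show d ∣ n from ⟨x, hdx2.symm⟩)
      exact mul_left_cancel₀ (show d ≠ 0 by omega) (h2.trans hdx2.symm)
    exact ⟨d, hd1, by nlinarith, (PySem.Int.mod_eq_zero_iff_dvd n d).mpr ⟨x, hdx2.symm⟩,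
      by rw [hfd]; omega, hfd.symm⟩

lemma pairwise_smallL (n i : Int) : 1 ≤ i → (smallL n i).Pairwise (· < ·) := by
  fun_induction smallL n i with
  | case1 i h ih =>
      intro hi
      rw [List.pairwise_append]
      refine ⟨by split_ifs <;> simp, ih (by omega), ?_⟩
      intro a ha b hb
      obtain ⟨hb1, -, -⟩ := (mem_smallL n (i + 1) b (by omega)).mp hb
      split_ifs at ha with hm
      · simp at ha; omega
      · simp at ha
  | case2 i h => intro _; simp

lemma pairwise_largeL (n i : Int) : 1 ≤ i → (largeL n i).Pairwise (fun a b => b < a) := by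
  fun_induction largeL n i with
  | case1 i h ih =>
      intro hi
      rw [List.pairwise_append]
      refine ⟨by split_ifs <;> simp, ih (by omega), ?_⟩
      intro a ha b hb
      obtain ⟨d, hd1, hd2, hmd, -, rfl⟩ := (mem_largeL n (i + 1) b (by omega)).mp hb
      split_ifs at ha with hm
      · simp at ha; subst ha
        exact quot_lt n i d hi (by omega) hd2 (by simpa using hm.1) hmd
      · simp at ha
  | case2 i h => intro _; simp

lemma memA (n d : Int) :
    d ∈ (PySem.List.pyRange 1 (n + 1) 1).filter (fun i => PySem.Int.mod n i == 0) ↔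
      1 ≤ d ∧ d ≤ n ∧ PySem.Int.mod n d = 0 := by
  rw [List.mem_filter, PySem.List.mem_pyRange_one]
  constructor
  · rintro ⟨⟨h1, h2⟩, h3⟩
    exact ⟨h1, by omega, by simpa using h3⟩
  · rintro ⟨h1, h2, h3⟩
    exact ⟨⟨h1, by omega⟩, by simpa using h3⟩

lemma divisors_split (n : Int) :
    (PySem.List.pyRange 1 (n + 1) 1).filter (fun i => PySem.Int.mod n i == 0)
      = smallL n 1 ++ (largeL n 1).reverse := by
  have hpA : ((PySem.List.pyRange 1 (n + 1) 1).filter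
      (fun i => PySem.Int.mod n i == 0)).Pairwise (· < ·) :=
    (PySem.List.pairwise_lt_pyRange_one 1 (n + 1)).filter _
  have hpB : (smallL n 1 ++ (largeL n 1).reverse).Pairwise (· < ·) := by
    rw [List.pairwise_append]
    refine ⟨pairwise_smallL n 1 (by omega), List.pairwise_reverse.mpr (pairwise_largeL n 1 (by omega)), ?_⟩
    intro a ha b hb
    rw [List.mem_reverse] at hb
    obtain ⟨ha1, ha2, -⟩ := (small_char n a).mp ha
    obtain ⟨hb1, -, -, hb4⟩ := (large_char n b).mp hb
    nlinarith
  have hmem : ∀ x, x ∈ (PySem.List.pyRange 1 (n + 1) 1).filter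
      (fun i => PySem.Int.mod n i == 0) ↔ x ∈ smallL n 1 ++ (largeL n 1).reverse := by
    intro x
    rw [memA, List.mem_append, List.mem_reverse, small_char, large_char]
    constructor
    · rintro ⟨h1, h2, h3⟩
      by_cases hc : x * x ≤ n
      · exact Or.inl ⟨h1, hc, h3⟩
      · exact Or.inr ⟨h1, h2, h3, by omega⟩
    · rintro (⟨h1, h2, h3⟩ | ⟨h1, h2, h3, -⟩)
      · exact ⟨h1, by nlinarith, h3⟩
      · exact ⟨h1, h2, h3⟩
  have hperm := (List.perm_ext_iff_of_nodup
    (hpA.imp fun h => ne_of_lt h) (hpB.imp fun h => ne_of_lt h)).mpr hmem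
  exact hperm.eq_of_pairwise (fun a b _ _ h1 h2 => absurd h2 (lt_asymm h1)) hpA hpB

-- ===== VERDICT (by name: the statement is the Claim_ definition above) =====
theorem find_divisors_and_prime_status_spec : Claim_equal_find_divisors_and_prime_status := by
  intro n _
  unfold Spec_find_divisors_and_prime_status find_divisors_and_prime_status find_divisors_and_prime_status_alt
  simp only [divLoop_eq, List.nil_append]
  rw [divisors_split n]
  exact List.map_congr_left (fun d _ => by rw [prime_eq d])
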